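-- pv_equiv track=rewrite | github.com/lright-psw/psw_coding | SWEA/Unrated/2382. ［모의 SW 역량테스트］ 미생물 격리/［모의 SW 역량테스트］ 미생물 격리.py | simulate_microorganisms
-- ===== SOURCE A (Python) =====
-- def simulate_microorganisms(N, M, K, clusters):
--     from collections import defaultdict
--
--     # 이동 방향: 상(1), 하(2), 좌(3), 우(4)
--     directions = {1: (-1, 0), 2: (1, 0), 3: (0, -1), 4: (0, 1)}
--     reverse_dir = {1: 2, 2: 1, 3: 4, 4: 3}
--
--     for _ in range(M):
--         new_clusters = defaultdict(list)
--
--         # 이동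
--         for r, c, num, d in clusters:
--             dr, dc = directions[d]
--             nr, nc = r + dr, c + dc
--
--             # 약품이 칠해진 곳에 도착하면 절반 감소 후 방향 변경
--             if nr == 0 or nc == 0 or nr == N - 1 or nc == N - 1:
--                 num //= 2
--                 d = reverse_dir[d]
--
--             if num > 0:
--                 new_clusters[(nr, nc)].append((num, d))
--
--         # 합치기
--         clusters = []
--         for (r, c), group in new_clusters.items():
--             if len(group) > 1:
--                 group.sort(reverse=True)  # 미생물 수가 많은 순으로 정렬
--                 total_num = sum(num for num, _ in group)
--                 d = group[0][1]  # 가장 많은 미생물 군집의 방향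
--                 clusters.append((r, c, total_num, d))
--             else:
--                 clusters.append((r, c) + group[0])
--
--     return sum(num for _, _, num, _ in clusters)
-- ===== SOURCE B (Python) =====
-- def simulate_microorganisms(N, M, K, clusters):
--     # One aggregating pass per step: each destination cell keeps a running
--     # (total, best_num, best_dir) instead of a list that is sorted afterwards.
--     directions = {1: (-1, 0), 2: (1, 0), 3: (0, -1), 4: (0, 1)}
--     reverse_dir = {1: 2, 2: 1, 3: 4, 4: 3}
--
--     for _ in range(M):
--         agg = {}
--         for r, c, num, d in clusters:
--             dr, dc = directions[d]
--             nr, nc = r + dr, c + dc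
--             if nr == 0 or nc == 0 or nr == N - 1 or nc == N - 1:
--                 num //= 2
--                 d = reverse_dir[d]
--             if num > 0:
--                 cur = agg.get((nr, nc))
--                 if cur is None:
--                     agg[(nr, nc)] = (num, num, d)
--                 else:
--                     total, bn, bd = cur
--                     if (num, d) > (bn, bd):
--                         bn, bd = num, d
--                     agg[(nr, nc)] = (total + num, bn, bd)
--         clusters = [(r, c, total, bd) for (r, c), (total, _, bd) in agg.items()]
--
--     return sum(num for _, _, num, _ in clusters)
-- ===== Notes on version B (the rewrite author's own statement) =====
-- stated objective: simpler
-- what changed: B replaces A's per-cell collect-into-lists-then-sort(reverse=True) merge step by a single aggregating dict that keeps a running (total, best_num, best_dir) per destination cell, updated with a lexicographic (num, d) > (best_num, best_dir) comparison, so the sort and the len(group)>1 branch disappear.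
import Mathlib
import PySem

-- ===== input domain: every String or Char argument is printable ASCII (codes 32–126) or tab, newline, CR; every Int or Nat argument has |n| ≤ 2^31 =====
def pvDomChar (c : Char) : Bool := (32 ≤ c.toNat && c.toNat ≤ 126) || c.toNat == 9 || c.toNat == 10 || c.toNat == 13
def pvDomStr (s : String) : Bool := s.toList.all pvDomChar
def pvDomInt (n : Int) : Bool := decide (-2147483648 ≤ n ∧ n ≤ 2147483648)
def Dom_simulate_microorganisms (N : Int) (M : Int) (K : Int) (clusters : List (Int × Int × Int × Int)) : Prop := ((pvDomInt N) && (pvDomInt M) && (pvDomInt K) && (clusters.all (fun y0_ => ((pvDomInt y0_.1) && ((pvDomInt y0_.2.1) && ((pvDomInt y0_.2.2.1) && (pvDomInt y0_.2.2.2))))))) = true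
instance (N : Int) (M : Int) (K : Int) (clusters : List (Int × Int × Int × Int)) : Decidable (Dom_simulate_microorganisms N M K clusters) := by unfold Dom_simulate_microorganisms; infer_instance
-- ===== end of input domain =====

-- B replaces A's collect-per-cell-then-sort merge by a single aggregating pass keeping a
-- running (total, best_num, best_dir) per destination cell (objective: simpler).

-- The two constant dicts both Pythons define identically.
def pvDirections : PySem.Dict Int (Int × Int) :=
  PySem.Dict.ofList [(1, (-1, 0)), (2, (1, 0)), (3, (0, -1)), (4, (0, 1))]
def pvReverseDir : PySem.Dict Int Int :=
  PySem.Dict.ofList [(1, 2), (2, 1), (3, 4), (4, 3)]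

-- ===== PORT A =====
-- one iteration of A's `for _ in range(M)` body
def pvStepA (N : Int) (clusters : List (Int × Int × Int × Int)) : List (Int × Int × Int × Int) :=
  let new_clusters : PySem.Dict (Int × Int) (List (Int × Int)) :=
    clusters.foldl (fun nc_ t =>
      -- directions[d] / reverse_dir[d]: a missing key is a KeyError, excluded by Pre_
      let dd := pvDirections.getD t.2.2.2 (0, 0)
      let nr := t.1 + dd.1
      let nc := t.2.1 + dd.2
      let numd : Int × Int :=
        if nr = 0 ∨ nc = 0 ∨ nr = N - 1 ∨ nc = N - 1 then
          (PySem.Int.floordiv t.2.2.1 2, pvReverseDir.getD t.2.2.2 0)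
        else (t.2.2.1, t.2.2.2)
      if numd.1 > 0 then nc_.modify (nr, nc) [] (fun g => g ++ [numd]) else nc_)
      PySem.Dict.empty
  new_clusters.items.foldl (fun acc kg =>
    if kg.2.length > 1 then
      let g' := PySem.List.sorted2 kg.2 (·.1) (·.2) true
      -- group[0] on the sorted group: groups are never empty, headD's default is unreachable
      acc ++ [(kg.1.1, kg.1.2, (g'.map (·.1)).sum, (g'.headD (0, 0)).2)]
    else
      acc ++ [(kg.1.1, kg.1.2, (kg.2.headD (0, 0)).1, (kg.2.headD (0, 0)).2)]) []

def simulate_microorganisms (N : Int) (M : Int) (K : Int) (clusters : List (Int × Int × Int × Int)) : Int :=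
  (((PySem.List.pyRange 0 M 1).foldl (fun cl _ => pvStepA N cl) clusters).map (·.2.2.1)).sum

-- ===== PORT B =====
-- one iteration of B's `for _ in range(M)` body
def pvStepB (N : Int) (clusters : List (Int × Int × Int × Int)) : List (Int × Int × Int × Int) :=
  let agg : PySem.Dict (Int × Int) (Int × Int × Int) :=
    clusters.foldl (fun ag t =>
      let dd := pvDirections.getD t.2.2.2 (0, 0)
      let nr := t.1 + dd.1
      let nc := t.2.1 + dd.2
      let numd : Int × Int :=
        if nr = 0 ∨ nc = 0 ∨ nr = N - 1 ∨ nc = N - 1 then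
          (PySem.Int.floordiv t.2.2.1 2, pvReverseDir.getD t.2.2.2 0)
        else (t.2.2.1, t.2.2.2)
      if numd.1 > 0 then
        match ag.get? (nr, nc) with
        | none => ag.insert (nr, nc) (numd.1, numd.1, numd.2)
        | some cur =>
          let best : Int × Int :=
            if cur.2.1 < numd.1 ∨ (cur.2.1 = numd.1 ∧ cur.2.2 < numd.2) then (numd.1, numd.2)
            else (cur.2.1, cur.2.2)
          ag.insert (nr, nc) (cur.1 + numd.1, best.1, best.2)
      else ag)
      PySem.Dict.empty
  agg.items.map (fun kv => (kv.1.1, kv.1.2, kv.2.1, kv.2.2.2))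

def simulate_microorganisms_alt (N : Int) (M : Int) (K : Int) (clusters : List (Int × Int × Int × Int)) : Int :=
  (((PySem.List.pyRange 0 M 1).foldl (fun cl _ => pvStepB N cl) clusters).map (·.2.2.1)).sum

-- ===== PRECONDITION & SPEC =====
-- Pre_ excludes exactly the inputs on which A raises KeyError: M > 0 together with some
-- cluster direction outside {1,2,3,4} (directions[d] / reverse_dir[d] in the first pass).
def Pre_simulate_microorganisms (N : Int) (M : Int) (K : Int) (clusters : List (Int × Int × Int × Int)) : Prop :=
  M ≤ 0 ∨ ∀ t ∈ clusters, t.2.2.2 = 1 ∨ t.2.2.2 = 2 ∨ t.2.2.2 = 3 ∨ t.2.2.2 = 4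
instance (N : Int) (M : Int) (K : Int) (clusters : List (Int × Int × Int × Int)) : Decidable (Pre_simulate_microorganisms N M K clusters) := by unfold Pre_simulate_microorganisms; infer_instance

def pvWitness_simulate_microorganisms : Int × Int × Int × (List (Int × Int × Int × Int)) :=
  (6, 2, 3, [(2, 2, 10, 1), (3, 3, 8, 4)])

def Spec_simulate_microorganisms (N : Int) (M : Int) (K : Int) (clusters : List (Int × Int × Int × Int)) (out : Int) : Prop := out = simulate_microorganisms_alt N M K clusters
instance (N : Int) (M : Int) (K : Int) (clusters : List (Int × Int × Int × Int)) (out : Int) : Decidable (Spec_simulate_microorganisms N M K clusters out) := by unfold Spec_simulate_microorganisms; infer_instance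

-- ===== CLAIM (what is proved, stated in full; the proofs are below) =====
def Claim_equal_simulate_microorganisms : Prop := ∀ (N : Int) (M : Int) (K : Int) (clusters : List (Int × Int × Int × Int)), Dom_simulate_microorganisms N M K clusters → Pre_simulate_microorganisms N M K clusters → Spec_simulate_microorganisms N M K clusters (simulate_microorganisms N M K clusters)

-- ===== LEMMAS AND PROOFS =====

-- the common "move one cluster" computation of both loop bodies
def pvMv (N : Int) (t : Int × Int × Int × Int) : (Int × Int) × (Int × Int) :=
  let dd := pvDirections.getD t.2.2.2 (0, 0)
  let nr := t.1 + dd.1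
  let nc := t.2.1 + dd.2
  let numd : Int × Int :=
    if nr = 0 ∨ nc = 0 ∨ nr = N - 1 ∨ nc = N - 1 then
      (PySem.Int.floordiv t.2.2.1 2, pvReverseDir.getD t.2.2.2 0)
    else (t.2.2.1, t.2.2.2)
  ((nr, nc), numd)

-- the moved-and-filtered stream both dict-building loops consume
def pvMoved (N : Int) (clusters : List (Int × Int × Int × Int)) : List ((Int × Int) × (Int × Int)) :=
  (clusters.map (pvMv N)).filter (fun p => decide (p.2.1 > 0))

def pvOpA (d : PySem.Dict (Int × Int) (List (Int × Int))) (p : (Int × Int) × (Int × Int)) :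
    PySem.Dict (Int × Int) (List (Int × Int)) :=
  d.modify p.1 [] (fun g => g ++ [p.2])

def pvCombine (o : Option (Int × Int × Int)) (x : Int × Int) : Int × Int × Int :=
  match o with
  | none => (x.1, x.1, x.2)
  | some cur =>
    (cur.1 + x.1,
     if cur.2.1 < x.1 ∨ (cur.2.1 = x.1 ∧ cur.2.2 < x.2) then (x.1, x.2) else (cur.2.1, cur.2.2))

def pvOpB (d : PySem.Dict (Int × Int) (Int × Int × Int)) (p : (Int × Int) × (Int × Int)) :
    PySem.Dict (Int × Int) (Int × Int × Int) :=
  d.insert p.1 (pvCombine (d.get? p.1) p.2)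

def pvLmax (b : Int × Int) (l : List (Int × Int)) : Int × Int :=
  l.foldl (fun b y => if b.1 < y.1 ∨ (b.1 = y.1 ∧ b.2 < y.2) then y else b) b

def pvItemA (kg : (Int × Int) × List (Int × Int)) : Int × Int × Int × Int :=
  (kg.1.1, kg.1.2,
   (if kg.2.length > 1 then
      ((PySem.List.sorted2 kg.2 (·.1) (·.2) true).map (·.1)).sum
    else (kg.2.headD (0, 0)).1),
   (if kg.2.length > 1 then
      ((PySem.List.sorted2 kg.2 (·.1) (·.2) true).headD (0, 0)).2
    else (kg.2.headD (0, 0)).2))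

lemma pvStepA_dict (N : Int) (cl : List (Int × Int × Int × Int)) :
    (cl.foldl (fun nc_ t =>
      let dd := pvDirections.getD t.2.2.2 (0, 0)
      let nr := t.1 + dd.1
      let nc := t.2.1 + dd.2
      let numd : Int × Int :=
        if nr = 0 ∨ nc = 0 ∨ nr = N - 1 ∨ nc = N - 1 then
          (PySem.Int.floordiv t.2.2.1 2, pvReverseDir.getD t.2.2.2 0)
        else (t.2.2.1, t.2.2.2)
      if numd.1 > 0 then nc_.modify (nr, nc) [] (fun g => g ++ [numd]) else nc_)
      PySem.Dict.empty) = (pvMoved N cl).foldl pvOpA PySem.Dict.empty := by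
  have h1 : (fun (nc_ : PySem.Dict (Int × Int) (List (Int × Int))) (t : Int × Int × Int × Int) =>
      let dd := pvDirections.getD t.2.2.2 (0, 0)
      let nr := t.1 + dd.1
      let nc := t.2.1 + dd.2
      let numd : Int × Int :=
        if nr = 0 ∨ nc = 0 ∨ nr = N - 1 ∨ nc = N - 1 then
          (PySem.Int.floordiv t.2.2.1 2, pvReverseDir.getD t.2.2.2 0)
        else (t.2.2.1, t.2.2.2)
      if numd.1 > 0 then nc_.modify (nr, nc) [] (fun g => g ++ [numd]) else nc_)
      = (fun acc t => if (pvMv N t).2.1 > 0 then pvOpA acc (pvMv N t) else acc) := rfl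
  rw [h1, pvMoved, ← PySem.List.foldl_ite_eq_foldl_filter
      (fun p : (Int × Int) × (Int × Int) => p.2.1 > 0) pvOpA]
  exact (List.foldl_map (f := pvMv N)
    (g := fun acc x => if x.2.1 > 0 then pvOpA acc x else acc)
    (l := cl) (init := PySem.Dict.empty)).symm

lemma pvStepB_dict (N : Int) (cl : List (Int × Int × Int × Int)) :
    (cl.foldl (fun ag t =>
      let dd := pvDirections.getD t.2.2.2 (0, 0)
      let nr := t.1 + dd.1
      let nc := t.2.1 + dd.2
      let numd : Int × Int :=
        if nr = 0 ∨ nc = 0 ∨ nr = N - 1 ∨ nc = N - 1 then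
          (PySem.Int.floordiv t.2.2.1 2, pvReverseDir.getD t.2.2.2 0)
        else (t.2.2.1, t.2.2.2)
      if numd.1 > 0 then
        match ag.get? (nr, nc) with
        | none => ag.insert (nr, nc) (numd.1, numd.1, numd.2)
        | some cur =>
          let best : Int × Int :=
            if cur.2.1 < numd.1 ∨ (cur.2.1 = numd.1 ∧ cur.2.2 < numd.2) then (numd.1, numd.2)
            else (cur.2.1, cur.2.2)
          ag.insert (nr, nc) (cur.1 + numd.1, best.1, best.2)
      else ag)
      PySem.Dict.empty) = (pvMoved N cl).foldl pvOpB PySem.Dict.empty := by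
  have h1 : (fun (ag : PySem.Dict (Int × Int) (Int × Int × Int)) (t : Int × Int × Int × Int) =>
      let dd := pvDirections.getD t.2.2.2 (0, 0)
      let nr := t.1 + dd.1
      let nc := t.2.1 + dd.2
      let numd : Int × Int :=
        if nr = 0 ∨ nc = 0 ∨ nr = N - 1 ∨ nc = N - 1 then
          (PySem.Int.floordiv t.2.2.1 2, pvReverseDir.getD t.2.2.2 0)
        else (t.2.2.1, t.2.2.2)
      if numd.1 > 0 then
        match ag.get? (nr, nc) with
        | none => ag.insert (nr, nc) (numd.1, numd.1, numd.2)
        | some cur =>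
          let best : Int × Int :=
            if cur.2.1 < numd.1 ∨ (cur.2.1 = numd.1 ∧ cur.2.2 < numd.2) then (numd.1, numd.2)
            else (cur.2.1, cur.2.2)
          ag.insert (nr, nc) (cur.1 + numd.1, best.1, best.2)
      else ag)
      = (fun acc t => if (pvMv N t).2.1 > 0 then pvOpB acc (pvMv N t) else acc) := by
    funext ag t
    show (if (pvMv N t).2.1 > 0 then
            match ag.get? (pvMv N t).1 with
            | none => ag.insert (pvMv N t).1 ((pvMv N t).2.1, (pvMv N t).2.1, (pvMv N t).2.2)
            | some cur =>
              let best : Int × Int :=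
                if cur.2.1 < (pvMv N t).2.1 ∨ (cur.2.1 = (pvMv N t).2.1 ∧ cur.2.2 < (pvMv N t).2.2) then
                  ((pvMv N t).2.1, (pvMv N t).2.2)
                else (cur.2.1, cur.2.2)
              ag.insert (pvMv N t).1 (cur.1 + (pvMv N t).2.1, best.1, best.2)
          else ag)
        = (if (pvMv N t).2.1 > 0 then pvOpB ag (pvMv N t) else ag)
    by_cases h : (pvMv N t).2.1 > 0
    · rw [if_pos h, if_pos h, pvOpB]
      cases hg : ag.get? (pvMv N t).1 with
      | none => simp [pvCombine]
      | some cur =>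
        by_cases hc : cur.2.1 < (pvMv N t).2.1 ∨ (cur.2.1 = (pvMv N t).2.1 ∧ cur.2.2 < (pvMv N t).2.2) <;>
          simp [pvCombine, hc]
    · rw [if_neg h, if_neg h]
  rw [h1, pvMoved, ← PySem.List.foldl_ite_eq_foldl_filter
      (fun p : (Int × Int) × (Int × Int) => p.2.1 > 0) pvOpB]
  exact (List.foldl_map (f := pvMv N)
    (g := fun acc x => if x.2.1 > 0 then pvOpB acc x else acc)
    (l := cl) (init := PySem.Dict.empty)).symm

lemma pvB_get? (L : List ((Int × Int) × (Int × Int))) :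
    ∀ (d : PySem.Dict (Int × Int) (Int × Int × Int)) (k : Int × Int),
    (L.foldl pvOpB d).get? k =
      ((L.filter (fun p => p.1 == k)).map (·.2)).foldl (fun o x => some (pvCombine o x)) (d.get? k) := by
  induction L with
  | nil => intro d k; rfl
  | cons p L ih =>
    intro d k
    rw [List.foldl_cons, List.filter_cons, ih]
    by_cases hk : p.1 = k
    · subst hk
      rw [if_pos (beq_self_eq_true p.1), List.map_cons, List.foldl_cons]
      have hget : (pvOpB d p).get? p.1 = some (pvCombine (d.get? p.1) p.2) := by
        rw [pvOpB, PySem.Dict.get?_insert, if_pos rfl]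
      rw [hget]
    · have hbeq : (p.1 == k) = false := beq_eq_false_iff_ne.mpr hk
      rw [if_neg (by simp [hbeq])]
      have hget : (pvOpB d p).get? k = d.get? k := by
        rw [pvOpB, PySem.Dict.get?_insert, if_neg (Ne.symm hk)]
      rw [hget]

lemma pvAgg_some (l : List (Int × Int)) :
    ∀ (t : Int) (b : Int × Int),
    l.foldl (fun o x => some (pvCombine o x)) (some (t, b.1, b.2)) =
      some (t + (l.map (·.1)).sum, pvLmax b l) := by
  induction l with
  | nil => intro t b; simp [pvLmax]
  | cons y l ih =>
    intro t b
    rw [List.foldl_cons, List.map_cons, List.sum_cons]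
    have step : some (pvCombine (some (t, b.1, b.2)) y)
        = some (t + y.1, (if b.1 < y.1 ∨ (b.1 = y.1 ∧ b.2 < y.2) then y else b).1,
            (if b.1 < y.1 ∨ (b.1 = y.1 ∧ b.2 < y.2) then y else b).2) := by
      simp only [pvCombine]
    rw [step, ih (t + y.1) (if b.1 < y.1 ∨ (b.1 = y.1 ∧ b.2 < y.2) then y else b),
      show pvLmax b (y :: l) = pvLmax (if b.1 < y.1 ∨ (b.1 = y.1 ∧ b.2 < y.2) then y else b) l from rfl,
      add_assoc]

lemma pvLmax_mem (l : List (Int × Int)) : ∀ (b : Int × Int), pvLmax b l = b ∨ pvLmax b l ∈ l := by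
  induction l with
  | nil => intro b; exact Or.inl rfl
  | cons y l ih =>
    intro b
    simp only [pvLmax, List.foldl_cons]
    rcases ih (if b.1 < y.1 ∨ (b.1 = y.1 ∧ b.2 < y.2) then y else b) with h | h
    · rw [pvLmax] at h
      rw [h]
      split_ifs with hc
      · exact Or.inr (List.mem_cons_self)
      · exact Or.inl rfl
    · rw [pvLmax] at h
      exact Or.inr (List.mem_cons_of_mem _ h)

lemma pvLmax_ge (l : List (Int × Int)) :
    ∀ (b : Int × Int), toLex b ≤ toLex (pvLmax b l) ∧ ∀ y ∈ l, toLex y ≤ toLex (pvLmax b l) := by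
  induction l with
  | nil =>
    intro b
    exact ⟨le_refl _, by simp⟩
  | cons y l ih =>
    intro b
    have hstep : (toLex b : Int ×ₗ Int) ≤ toLex (if b.1 < y.1 ∨ (b.1 = y.1 ∧ b.2 < y.2) then y else b)
        ∧ (toLex y : Int ×ₗ Int) ≤ toLex (if b.1 < y.1 ∨ (b.1 = y.1 ∧ b.2 < y.2) then y else b) := by
      split_ifs with hc
      · exact ⟨le_of_lt (Prod.Lex.lt_iff.mpr (by simpa using hc)), le_refl _⟩
      · refine ⟨le_refl _, ?_⟩
        have hnlt : ¬ ((toLex b : Int ×ₗ Int) < toLex y) := by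
          rw [Prod.Lex.lt_iff]
          simpa using hc
        exact not_lt.mp hnlt
    obtain ⟨h1, h2⟩ := ih (if b.1 < y.1 ∨ (b.1 = y.1 ∧ b.2 < y.2) then y else b)
    simp only [pvLmax, List.foldl_cons]
    refine ⟨le_trans hstep.1 h1, ?_⟩
    intro z hz
    rcases List.mem_cons.mp hz with rfl | hz2
    · exact le_trans hstep.2 h1
    · exact h2 z hz2

lemma pvSorted2_eq (g : List (Int × Int)) :
    PySem.List.sorted2 g (·.1) (·.2) true
      = PySem.List.sorted g (fun p => (toLex p : Int ×ₗ Int)) true := by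
  have hB : (fun a b : Int × Int => decide (b.1 < a.1) || (!decide (a.1 < b.1) && decide (b.2 < a.2)))
      = (fun a b : Int × Int => decide ((toLex b : Int ×ₗ Int) < toLex a)) := by
    funext a b
    have hiff : ((toLex b : Int ×ₗ Int) < toLex a) ↔ (b.1 < a.1 ∨ (¬ (a.1 < b.1) ∧ b.2 < a.2)) := by
      rw [Prod.Lex.lt_iff]
      simp only [ofLex_toLex]
      constructor
      · rintro (h | ⟨h1, h2⟩)
        · exact Or.inl h
        · exact Or.inr ⟨by omega, h2⟩
      · rintro (h | ⟨h1, h2⟩)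
        · exact Or.inl h
        · rcases lt_trichotomy b.1 a.1 with h3 | h3 | h3
          · exact Or.inl h3
          · exact Or.inr ⟨h3, h2⟩
          · exact absurd h3 h1
    rw [show (decide ((toLex b : Int ×ₗ Int) < toLex a))
        = decide (b.1 < a.1 ∨ (¬ (a.1 < b.1) ∧ b.2 < a.2)) from decide_eq_decide.mpr hiff]
    by_cases h1 : b.1 < a.1 <;> by_cases h2 : a.1 < b.1 <;> by_cases h3 : b.2 < a.2 <;>
      simp [h1, h2, h3]
  simp only [PySem.List.sorted2, PySem.List.sorted, reduceIte]
  rw [hB]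

lemma pvGroup_eq (x : Int × Int) (rest : List (Int × Int)) :
    ((if (x :: rest).length > 1 then
        ((PySem.List.sorted2 (x :: rest) (·.1) (·.2) true).map (·.1)).sum
      else ((x :: rest).headD (0, 0)).1),
     (if (x :: rest).length > 1 then
        ((PySem.List.sorted2 (x :: rest) (·.1) (·.2) true).headD (0, 0)).2
      else ((x :: rest).headD (0, 0)).2))
    = (x.1 + (rest.map (·.1)).sum, (pvLmax x rest).2) := by
  cases rest with
  | nil => simp [pvLmax]
  | cons y rest2 =>
    have hlen : (x :: y :: rest2).length > 1 := by simp
    rw [if_pos hlen, if_pos hlen, pvSorted2_eq]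
    have hnil : PySem.List.sorted (x :: y :: rest2) (fun p => (toLex p : Int ×ₗ Int)) true ≠ [] := by
      rw [Ne, PySem.List.sorted_eq_nil_iff]
      simp
    obtain ⟨m, t, hst⟩ := List.exists_cons_of_ne_nil hnil
    have hperm := PySem.List.sorted_perm (x :: y :: rest2) (fun p => (toLex p : Int ×ₗ Int)) true
    have hsum : ((PySem.List.sorted (x :: y :: rest2) (fun p => (toLex p : Int ×ₗ Int)) true).map (·.1)).sum
        = ((x :: y :: rest2).map (·.1)).sum := (hperm.map (·.1)).sum_eq
    have hge := PySem.List.key_head_sorted_rev_ge (x :: y :: rest2) (fun p => (toLex p : Int ×ₗ Int)) hst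
    have hmmem : m ∈ (x :: y :: rest2) := by
      have hm : m ∈ PySem.List.sorted (x :: y :: rest2) (fun p => (toLex p : Int ×ₗ Int)) true := by
        rw [hst]; exact List.mem_cons_self
      exact (PySem.List.mem_sorted _ _ _ m).mp hm
    have hbmem : pvLmax x (y :: rest2) ∈ (x :: y :: rest2) := by
      rcases pvLmax_mem (y :: rest2) x with h | h
      · rw [h]; exact List.mem_cons_self
      · exact List.mem_cons_of_mem _ h
    have hble : ∀ z ∈ (x :: y :: rest2), (toLex z : Int ×ₗ Int) ≤ toLex (pvLmax x (y :: rest2)) := by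
      intro z hz
      rcases List.mem_cons.mp hz with rfl | hz2
      · exact (pvLmax_ge (y :: rest2) z).1
      · exact (pvLmax_ge (y :: rest2) x).2 z hz2
    have hmb : m = pvLmax x (y :: rest2) :=
      toLex.injective (le_antisymm (hble m hmmem) (hge _ hbmem))
    rw [Prod.mk.injEq]
    constructor
    · rw [hsum]; simp
    · rw [hst]
      simp only [List.headD_cons]
      rw [hmb]

lemma pvStep_eq (N : Int) (cl : List (Int × Int × Int × Int)) : pvStepA N cl = pvStepB N cl := by
  simp only [pvStepA, pvStepB]
  rw [pvStepA_dict, pvStepB_dict]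
  have hbody : (fun (acc : List (Int × Int × Int × Int)) (kg : (Int × Int) × List (Int × Int)) =>
      if kg.2.length > 1 then
        acc ++ [(kg.1.1, kg.1.2, ((PySem.List.sorted2 kg.2 (·.1) (·.2) true).map (·.1)).sum,
          ((PySem.List.sorted2 kg.2 (·.1) (·.2) true).headD (0, 0)).2)]
      else acc ++ [(kg.1.1, kg.1.2, (kg.2.headD (0, 0)).1, (kg.2.headD (0, 0)).2)])
      = (fun acc kg => acc ++ [pvItemA kg]) := by
    funext acc kg
    by_cases h : kg.2.length > 1 <;> simp [pvItemA, h]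
  rw [hbody, PySem.List.foldl_append_singleton_eq_map, List.nil_append]
  have hopA : (fun (d : PySem.Dict (Int × Int) (List (Int × Int))) (p : (Int × Int) × (Int × Int)) =>
      d.modify ((fun q : (Int × Int) × (Int × Int) => q.1) p) []
        ((fun (_ : PySem.Dict (Int × Int) (List (Int × Int))) (q : (Int × Int) × (Int × Int)) =>
          fun g => g ++ [q.2]) d p)) = pvOpA := rfl
  have hopB : (fun (d : PySem.Dict (Int × Int) (Int × Int × Int)) (p : (Int × Int) × (Int × Int)) =>
      d.insert ((fun q : (Int × Int) × (Int × Int) => q.1) p)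
        ((fun (d : PySem.Dict (Int × Int) (Int × Int × Int)) (q : (Int × Int) × (Int × Int)) =>
          pvCombine (d.get? q.1) q.2) d p)) = pvOpB := rfl
  have hndA := PySem.Dict.nodup_keys_foldl_modify_key (pvMoved N cl)
      (fun q : (Int × Int) × (Int × Int) => q.1) []
      (fun _ q => fun g => g ++ [q.2]) PySem.Dict.empty
      (by rw [PySem.Dict.keys_empty]; exact List.nodup_nil)
  have hndB := PySem.Dict.nodup_keys_foldl_insert_key (pvMoved N cl)
      (fun q : (Int × Int) × (Int × Int) => q.1)
      (fun d q => pvCombine (d.get? q.1) q.2) PySem.Dict.empty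
      (by rw [PySem.Dict.keys_empty]; exact List.nodup_nil)
  rw [hopA] at hndA
  rw [hopB] at hndB
  have hKA := PySem.Dict.keys_foldl_modify_key (pvMoved N cl)
      (fun q : (Int × Int) × (Int × Int) => q.1) []
      (fun _ q => fun g => g ++ [q.2]) PySem.Dict.empty
  have hKB := PySem.Dict.keys_foldl_insert_key (pvMoved N cl)
      (fun q : (Int × Int) × (Int × Int) => q.1)
      (fun d q => pvCombine (d.get? q.1) q.2) PySem.Dict.empty
  rw [hopA] at hKA
  rw [hopB] at hKB
  rw [PySem.Dict.keys_empty, PySem.Set.update_nil_left] at hKA hKB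
  rw [PySem.Dict.items_eq_map_keys _ hndA [],
    PySem.Dict.items_eq_map_keys _ hndB ((0 : Int), (0 : Int), (0 : Int)),
    hKA, hKB, List.map_map, List.map_map]
  apply List.map_congr_left
  intro k hk
  obtain ⟨p, hpL, hpk⟩ : ∃ p ∈ pvMoved N cl, p.1 = k := by
    have hk2 : k ∈ (pvMoved N cl).map (fun q : (Int × Int) × (Int × Int) => q.1) :=
      (PySem.Set.mem_ofList _ _).mp hk
    obtain ⟨p, hp, hpe⟩ := List.mem_map.mp hk2
    exact ⟨p, hp, hpe⟩
  have hgA : (List.foldl pvOpA PySem.Dict.empty (pvMoved N cl)).getD k []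
      = ((pvMoved N cl).filter (fun q => q.1 == k)).map (fun q => q.2) := by
    have h := PySem.Dict.getD_foldl_modify_append (pvMoved N cl) PySem.Dict.empty k
    have h2 : (fun (d : PySem.Dict (Int × Int) (List (Int × Int))) (q : (Int × Int) × (Int × Int)) =>
        d.modify q.1 [] fun xs => xs ++ [q.2]) = pvOpA := rfl
    rw [h2] at h
    rw [h, PySem.Dict.getD_empty, List.nil_append]
  have hne : ((pvMoved N cl).filter (fun q => q.1 == k)).map (fun q => q.2) ≠ [] := by
    have hpf : p ∈ (pvMoved N cl).filter (fun q => q.1 == k) :=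
      List.mem_filter.mpr ⟨hpL, by simp [hpk]⟩
    intro hcon
    rw [List.map_eq_nil_iff] at hcon
    rw [hcon] at hpf
    exact List.not_mem_nil hpf
  obtain ⟨x, g2, hx⟩ := List.exists_cons_of_ne_nil hne
  have hgB : (List.foldl pvOpB PySem.Dict.empty (pvMoved N cl)).getD k ((0 : Int), (0 : Int), (0 : Int))
      = (x.1 + (g2.map (·.1)).sum, pvLmax x g2) := by
    rw [PySem.Dict.getD_eq_get?_getD, pvB_get? (pvMoved N cl) PySem.Dict.empty k,
      PySem.Dict.get?_empty, hx, List.foldl_cons]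
    have h0 : some (pvCombine none x) = some ((x.1 : Int), x.1, x.2) := rfl
    rw [h0, pvAgg_some g2 x.1 x]
    rfl
  simp only [Function.comp]
  rw [hgA, hx, hgB]
  exact congrArg (fun z : Int × Int => ((k.1 : Int), (k.2 : Int), z.1, z.2)) (pvGroup_eq x g2)

-- ===== VERDICT (by name: the statement is the Claim_ definition above) =====
theorem simulate_microorganisms_spec : Claim_equal_simulate_microorganisms := by
  intro N M K clusters _ _
  unfold Spec_simulate_microorganisms
  unfold simulate_microorganisms simulate_microorganisms_alt
  have h : (fun (cl : List (Int × Int × Int × Int)) (_ : Int) => pvStepA N cl)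
      = (fun cl _ => pvStepB N cl) := by
    funext cl i
    exact pvStep_eq N cl
  rw [h]
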